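-- pv_equiv track=rewrite | github.com/mariolocci/rnn_yelp | embeddedwords.py | getTextAndLabel
-- ===== SOURCE A (Python) =====
-- def getTextAndLabel(lines):
--     text_data=[]
--     text_labels=[]
--     text_sent=[]
--     for x in lines:
--         splitted=x.split('|')
--         if len( splitted)==3 and len(splitted[0])>5 :
--             text_data.append(splitted[0])
--             text_labels.append(splitted[1])
--             text_sent.append(splitted[2])
--     return [text_data,text_labels,text_sent]
-- ===== SOURCE B (Python) =====
-- def getTextAndLabel(lines):
--     rows = [s for s in (x.split('|') for x in lines) if len(s) == 3 and len(s[0]) > 5]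
--     cols = [list(c) for c in zip(*rows)]
--     return cols if cols else [[], [], []]
-- ===== Notes on version B (the rewrite author's own statement) =====
-- stated objective: idiomatic
-- what changed: B builds the list of kept 3-element rows with comprehensions and transposes it into the three column lists via zip(*rows), instead of A's single loop appending to three parallel accumulators.
import Mathlib
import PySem

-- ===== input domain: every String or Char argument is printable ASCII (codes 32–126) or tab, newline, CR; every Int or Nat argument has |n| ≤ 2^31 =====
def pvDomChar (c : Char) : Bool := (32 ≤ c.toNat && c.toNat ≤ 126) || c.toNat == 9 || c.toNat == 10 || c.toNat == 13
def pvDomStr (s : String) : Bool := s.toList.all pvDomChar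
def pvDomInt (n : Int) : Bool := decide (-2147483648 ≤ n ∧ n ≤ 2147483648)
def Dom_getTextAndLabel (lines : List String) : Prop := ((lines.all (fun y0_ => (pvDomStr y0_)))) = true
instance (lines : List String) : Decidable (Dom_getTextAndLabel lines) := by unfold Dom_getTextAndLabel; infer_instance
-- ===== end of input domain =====

-- B: builds the kept 3-element rows once (comprehension) and transposes them into the
-- three column lists (zip(*rows)), instead of A's loop over three parallel accumulators.


-- ===== PORT A =====
-- A: one loop, appending to the three accumulator lists; the guard len==3 makes the
-- indexed accesses safe, so getD defaults are never used.
def getTextAndLabel (lines : List String) : List (List String) :=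
  let st := lines.foldl
    (fun (acc : List String × List String × List String) x =>
      let splitted := (PySem.Str.split? x "|").getD []
      if splitted.length = 3 ∧ PySem.Str.len (splitted.getD 0 "") > 5 then
        (acc.1 ++ [splitted.getD 0 ""], acc.2.1 ++ [splitted.getD 1 ""],
         acc.2.2 ++ [splitted.getD 2 ""])
      else acc)
    ([], [], [])
  [st.1, st.2.1, st.2.2]

-- ===== PORT B =====
-- B: filter the split rows, then transpose (zip(*rows)); empty case special-cased as in Source B.
def getTextAndLabel_alt (lines : List String) : List (List String) :=
  let rows := (lines.map (fun x => (PySem.Str.split? x "|").getD [])).filter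
    (fun s => decide (s.length = 3 ∧ PySem.Str.len (s.getD 0 "") > 5))
  let cols := [rows.map (fun r => r.getD 0 ""), rows.map (fun r => r.getD 1 ""),
               rows.map (fun r => r.getD 2 "")]
  if rows.isEmpty then [[], [], []] else cols

-- ===== PRECONDITION & SPEC =====
def Spec_getTextAndLabel (lines : List String) (out : List (List String)) : Prop := out = getTextAndLabel_alt lines
instance (lines : List String) (out : List (List String)) : Decidable (Spec_getTextAndLabel lines out) := by unfold Spec_getTextAndLabel; infer_instance

-- ===== CLAIM (what is proved, stated in full; the proofs are below) =====
def Claim_equal_getTextAndLabel : Prop := ∀ (lines : List String), Dom_getTextAndLabel lines → Spec_getTextAndLabel lines (getTextAndLabel lines)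

-- ===== LEMMAS AND PROOFS =====

-- the loop of A, from any accumulator, appends the three columns of the kept rows
theorem getTextAndLabel_foldl (lines : List String)
    (d l s : List String) :
    lines.foldl
      (fun (acc : List String × List String × List String) x =>
        let splitted := (PySem.Str.split? x "|").getD []
        if splitted.length = 3 ∧ PySem.Str.len (splitted.getD 0 "") > 5 then
          (acc.1 ++ [splitted.getD 0 ""], acc.2.1 ++ [splitted.getD 1 ""],
           acc.2.2 ++ [splitted.getD 2 ""])
        else acc)
      (d, l, s)
    = (let rows := (lines.map (fun x => (PySem.Str.split? x "|").getD [])).filter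
         (fun r => decide (r.length = 3 ∧ PySem.Str.len (r.getD 0 "") > 5));
       (d ++ rows.map (fun r => r.getD 0 ""), l ++ rows.map (fun r => r.getD 1 ""),
        s ++ rows.map (fun r => r.getD 2 ""))) := by
  induction lines generalizing d l s with
  | nil => simp
  | cons x xs ih =>
    simp only [List.foldl_cons, List.map_cons, List.filter_cons]
    by_cases h : ((PySem.Str.split? x "|").getD []).length = 3 ∧
        PySem.Str.len (((PySem.Str.split? x "|").getD []).getD 0 "") > 5
    · rw [if_pos h, if_pos (decide_eq_true h), ih]
      simp only [List.map_cons, List.append_assoc, List.singleton_append]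
    · rw [if_neg h, if_neg (by simpa using h), ih]

-- ===== VERDICT (by name: the statement is the Claim_ definition above) =====
theorem getTextAndLabel_spec : Claim_equal_getTextAndLabel := by
  intro lines _
  show getTextAndLabel lines = getTextAndLabel_alt lines
  unfold getTextAndLabel getTextAndLabel_alt
  rw [getTextAndLabel_foldl]
  set rows := (lines.map (fun x => (PySem.Str.split? x "|").getD [])).filter
    (fun r => decide (r.length = 3 ∧ PySem.Str.len (r.getD 0 "") > 5)) with hrows
  by_cases h : rows = [] <;> simp [h]
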